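-- pv_equiv track=rewrite | github.com/offenesdresden/dvbpy | dvb/dvb.py | _pin_type_from_id
-- ===== SOURCE A (Python) =====
-- def _pin_type_from_id(pin_id: str) -> str:
--     """Determine pin type from its ID prefix."""
--     if pin_id.isdigit():
--         return "Stop"
--     prefixes = {
--         "pf:": "Platform",
--         "pr:": "ParkAndRide",
--         "p:": "Poi",
--         "r:": "RentABike",
--         "t:": "TicketMachine",
--         "c:": "CarSharing",
--         "w:": "Footpath",
--     }
--     for prefix, pin_type in prefixes.items():
--         if pin_id.startswith(prefix):
--             return pin_type
--     return "Unknown"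
-- ===== SOURCE B (Python) =====
-- _CODE_TO_TYPE = {
--     "pf": "Platform",
--     "pr": "ParkAndRide",
--     "p": "Poi",
--     "r": "RentABike",
--     "t": "TicketMachine",
--     "c": "CarSharing",
--     "w": "Footpath",
-- }
--
--
-- def _pin_type_from_id(pin_id: str) -> str:
--     if pin_id.isdigit():
--         return "Stop"
--     code, colon, _ = pin_id.partition(":")
--     if not colon:
--         return "Unknown"
--     return _CODE_TO_TYPE.get(code, "Unknown")
-- ===== Notes on version B (the rewrite author's own statement) =====
-- stated objective: simpler
-- what changed: Replaced the ordered linear scan over colon-suffixed prefixes with partitioning the id at the first colon and one keyed lookup of the category code, removing the startswith loop and its ordering dependency.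
import Mathlib
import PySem

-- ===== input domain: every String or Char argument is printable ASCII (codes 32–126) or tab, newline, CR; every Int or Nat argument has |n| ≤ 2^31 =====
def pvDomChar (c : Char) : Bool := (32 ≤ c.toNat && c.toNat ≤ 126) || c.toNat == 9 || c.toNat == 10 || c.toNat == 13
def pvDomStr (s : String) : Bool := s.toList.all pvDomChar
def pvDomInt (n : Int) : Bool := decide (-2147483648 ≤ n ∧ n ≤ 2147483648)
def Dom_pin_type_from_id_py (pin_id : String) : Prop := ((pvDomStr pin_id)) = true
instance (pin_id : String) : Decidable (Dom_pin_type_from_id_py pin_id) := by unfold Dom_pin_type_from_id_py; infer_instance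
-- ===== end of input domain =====

-- B replaces A's ordered startswith scan by partitioning the id at the first colon and one keyed lookup of the code (simpler).

-- ===== PORT A =====
-- the 'for prefix, pin_type in prefixes.items()' loop, one step per dict item
def pinGoA (pin_id : String) : List (String × String) → String
  | [] => "Unknown"
  | (p, t) :: rest => if PySem.Str.startswith pin_id p then t else pinGoA pin_id rest

def pin_type_from_id_py (pin_id : String) : String :=
  if PySem.Str.strIsdigit pin_id then "Stop"
  else pinGoA pin_id [("pf:", "Platform"), ("pr:", "ParkAndRide"), ("p:", "Poi"),
    ("r:", "RentABike"), ("t:", "TicketMachine"), ("c:", "CarSharing"), ("w:", "Footpath")]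

-- ===== PORT B =====
def pinCodeMap : PySem.Dict (List Char) String :=
  PySem.Dict.ofList [("pf".toList, "Platform"), ("pr".toList, "ParkAndRide"), ("p".toList, "Poi"),
    ("r".toList, "RentABike"), ("t".toList, "TicketMachine"), ("c".toList, "CarSharing"), ("w".toList, "Footpath")]

-- partition(":") ported by hand (exact for a one-char separator): code = chars before the
-- first ':', and the separator component is nonempty iff ':' occurs in the string.
def pin_type_from_id_py_alt (pin_id : String) : String :=
  if PySem.Str.strIsdigit pin_id then "Stop"
  else if ':' ∈ pin_id.toList then
    PySem.Dict.getD pinCodeMap (pin_id.toList.takeWhile (· ≠ ':')) "Unknown"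
  else "Unknown"

-- ===== PRECONDITION & SPEC =====
def Spec_pin_type_from_id_py (pin_id : String) (out : String) : Prop := out = pin_type_from_id_py_alt pin_id
instance (pin_id : String) (out : String) : Decidable (Spec_pin_type_from_id_py pin_id out) := by unfold Spec_pin_type_from_id_py; infer_instance

-- ===== CLAIM (what is proved, stated in full; the proofs are below) =====
def Claim_equal_pin_type_from_id_py : Prop := ∀ (pin_id : String), Dom_pin_type_from_id_py pin_id → Spec_pin_type_from_id_py pin_id (pin_type_from_id_py pin_id)

-- ===== LEMMAS AND PROOFS =====

theorem takeWhile_append_colon (p rest : List Char) (hp : ':' ∉ p) :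
    List.takeWhile (fun c => decide (c ≠ ':')) (p ++ ':' :: rest) = p := by
  induction p with
  | nil => simp
  | cons a p ih =>
    have ha : a ≠ ':' := fun h => hp (by simp [h])
    have hp' : ':' ∉ p := fun h => hp (List.mem_cons_of_mem _ h)
    rw [List.cons_append, List.takeWhile_cons_of_pos (by simpa using ha), ih hp']

-- A 'code:' prefix matches iff a colon occurs and the chars before the first colon are exactly the code.
theorem startswith_colon_iff (l p : List Char) (hp : ':' ∉ p) :
    PySem.Chars.startswith l (p ++ [':']) = true ↔ (':' ∈ l ∧ l.takeWhile (· ≠ ':') = p) := by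
  rw [PySem.Chars.startswith_iff]
  constructor
  · rintro ⟨rest, hrest⟩
    subst hrest
    refine ⟨by simp, ?_⟩
    simpa using takeWhile_append_colon p rest hp
  · rintro ⟨hmem, htw⟩
    have hsplit := (List.takeWhile_append_dropWhile (p := fun c => decide (c ≠ ':')) (l := l)).symm
    have hdrop : l.dropWhile (fun c => decide (c ≠ ':')) ≠ [] := by
      intro hnil
      have := (List.dropWhile_eq_nil_iff).mp hnil ':' hmem
      simp at this
    obtain ⟨d, ds, hds⟩ := List.exists_cons_of_ne_nil hdrop
    have hd : d = ':' := by
      have hh := List.head_dropWhile_not (p := fun c => decide (c ≠ ':')) (l := l) hdrop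
      simp only [hds, List.head_cons] at hh
      simpa using hh
    refine ⟨ds, ?_⟩
    rw [hsplit, htw, hds, hd]
    simp

theorem startswith_colon_false (l p : List Char) (h : ':' ∉ l) :
    PySem.Chars.startswith l (p ++ [':']) = false := by
  rw [Bool.eq_false_iff]
  intro htrue
  rw [PySem.Chars.startswith_iff] at htrue
  rcases htrue with ⟨rest, hrest⟩
  exact h (by rw [← hrest]; simp)

theorem sw_eq (l p : List Char) (hp : ':' ∉ p) (hc : ':' ∈ l) :
    PySem.Chars.startswith l (p ++ [':']) = decide (l.takeWhile (· ≠ ':') = p) := by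
  by_cases h : l.takeWhile (· ≠ ':') = p
  · rw [(startswith_colon_iff l p hp).mpr ⟨hc, h⟩]
    exact (decide_eq_true h).symm
  · have hf : PySem.Chars.startswith l (p ++ [':']) = false := by
      rw [Bool.eq_false_iff]
      intro ht
      exact h ((startswith_colon_iff l p hp).mp ht).2
    rw [hf]
    exact (decide_eq_false h).symm

-- ===== VERDICT (by name: the statement is the Claim_ definition above) =====
theorem pin_type_from_id_py_spec : Claim_equal_pin_type_from_id_py := by
  intro pin_id _
  unfold Spec_pin_type_from_id_py pin_type_from_id_py pin_type_from_id_py_alt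
  by_cases hd : PySem.Str.strIsdigit pin_id = true
  · rw [if_pos hd, if_pos hd]
  · rw [if_neg hd, if_neg hd]
    simp only [pinGoA, PySem.Str.startswith_eq]
    by_cases hc : ':' ∈ pin_id.toList
    · rw [if_pos hc]
      have e1 : ("pf:" : String).toList = ['p','f'] ++ [':'] := by decide
      have e2 : ("pr:" : String).toList = ['p','r'] ++ [':'] := by decide
      have e3 : ("p:" : String).toList = ['p'] ++ [':'] := by decide
      have e4 : ("r:" : String).toList = ['r'] ++ [':'] := by decide
      have e5 : ("t:" : String).toList = ['t'] ++ [':'] := by decide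
      have e6 : ("c:" : String).toList = ['c'] ++ [':'] := by decide
      have e7 : ("w:" : String).toList = ['w'] ++ [':'] := by decide
      rw [e1, e2, e3, e4, e5, e6, e7,
        sw_eq _ _ (by decide) hc, sw_eq _ _ (by decide) hc, sw_eq _ _ (by decide) hc,
        sw_eq _ _ (by decide) hc, sw_eq _ _ (by decide) hc, sw_eq _ _ (by decide) hc,
        sw_eq _ _ (by decide) hc]
      set t := pin_id.toList.takeWhile (· ≠ ':') with ht
      by_cases h1 : t = ['p','f']; · simp [h1]; rfl
      by_cases h2 : t = ['p','r']; · simp [h2]; rfl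
      by_cases h3 : t = ['p'];     · simp [h3]; rfl
      by_cases h4 : t = ['r'];     · simp [h4]; rfl
      by_cases h5 : t = ['t'];     · simp [h5]; rfl
      by_cases h6 : t = ['c'];     · simp [h6]; rfl
      by_cases h7 : t = ['w'];     · simp [h7]; rfl
      have h1' : ¬(['p','f'] = t) := fun h => h1 h.symm
      have h2' : ¬(['p','r'] = t) := fun h => h2 h.symm
      have h3' : ¬(['p'] = t) := fun h => h3 h.symm
      have h4' : ¬(['r'] = t) := fun h => h4 h.symm
      have h5' : ¬(['t'] = t) := fun h => h5 h.symm
      have h6' : ¬(['c'] = t) := fun h => h6 h.symm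
      have h7' : ¬(['w'] = t) := fun h => h7 h.symm
      have b1 : ((['p','f'] : List Char) == t) = false := beq_eq_false_iff_ne.mpr h1'
      have b2 : ((['p','r'] : List Char) == t) = false := beq_eq_false_iff_ne.mpr h2'
      have b3 : ((['p'] : List Char) == t) = false := beq_eq_false_iff_ne.mpr h3'
      have b4 : ((['r'] : List Char) == t) = false := beq_eq_false_iff_ne.mpr h4'
      have b5 : ((['t'] : List Char) == t) = false := beq_eq_false_iff_ne.mpr h5'
      have b6 : ((['c'] : List Char) == t) = false := beq_eq_false_iff_ne.mpr h6'
      have b7 : ((['w'] : List Char) == t) = false := beq_eq_false_iff_ne.mpr h7'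
      simp [h1, h2, h3, h4, h5, h6, h7, pinCodeMap, PySem.Dict.getD, PySem.Dict.get?,
        PySem.Dict.ofList, PySem.Dict.update, PySem.Dict.items, PySem.Dict.empty,
        PySem.Dict.insert, List.find?, b1, b2, b3, b4, b5, b6, b7]
    · rw [if_neg hc]
      have e1 : ("pf:" : String).toList = ['p','f'] ++ [':'] := by decide
      have e2 : ("pr:" : String).toList = ['p','r'] ++ [':'] := by decide
      have e3 : ("p:" : String).toList = ['p'] ++ [':'] := by decide
      have e4 : ("r:" : String).toList = ['r'] ++ [':'] := by decide
      have e5 : ("t:" : String).toList = ['t'] ++ [':'] := by decide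
      have e6 : ("c:" : String).toList = ['c'] ++ [':'] := by decide
      have e7 : ("w:" : String).toList = ['w'] ++ [':'] := by decide
      rw [e1, e2, e3, e4, e5, e6, e7,
        startswith_colon_false _ _ hc, startswith_colon_false _ _ hc, startswith_colon_false _ _ hc,
        startswith_colon_false _ _ hc, startswith_colon_false _ _ hc, startswith_colon_false _ _ hc,
        startswith_colon_false _ _ hc]
      simp
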